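-- pv_equiv track=rewrite | github.com/dev-jwel/TiaRa | src/dataset_loader/utils.py | aggregate_by_time
-- ===== SOURCE A (Python) =====
-- def aggregate_by_time(raw_edges, time_aggregation):
-- 	"""
-- 	Parameters
-- 	----------
-- 	raw_edges
-- 		list of the edges
-- 	time_aggregation
-- 		time step size in seconds
--
-- 	Returns
-- 	-------
-- 	list of edges in the single time step
-- 	"""
-- 	times = [int(re['time'] // time_aggregation) for re in raw_edges]
--
-- 	min_time, max_time = min(times), max(times)
-- 	times = [t - min_time for t in times]
-- 	time_steps = max_time - min_time + 1
-- 	seperated_edges = [[] for _ in range(time_steps)]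
--
-- 	for i, edge in enumerate(raw_edges):
-- 		t = times[i]
-- 		seperated_edges[t].append(edge)
--
-- 	return seperated_edges
-- ===== SOURCE B (Python) =====
-- def aggregate_by_time(raw_edges, time_aggregation):
--     def bin(e):
--         return int(e['time'] // time_aggregation)
--     lo = min(bin(e) for e in raw_edges)
--     hi = max(bin(e) for e in raw_edges)
--     return [[e for e in raw_edges if bin(e) == t] for t in range(lo, hi + 1)]
-- ===== Notes on version B (the rewrite author's own statement) =====
-- stated objective: simpler
-- what changed: B drops A's times list, min-offset re-indexing and scatter into a preallocated bucket list entirely: it computes lo/hi and then builds each time step's bucket by a direct order-preserving selection [e for e in raw_edges if bin(e) == t] over the range, trading A's O(n+T) scatter for a per-bucket filter scan.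
import Mathlib
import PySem

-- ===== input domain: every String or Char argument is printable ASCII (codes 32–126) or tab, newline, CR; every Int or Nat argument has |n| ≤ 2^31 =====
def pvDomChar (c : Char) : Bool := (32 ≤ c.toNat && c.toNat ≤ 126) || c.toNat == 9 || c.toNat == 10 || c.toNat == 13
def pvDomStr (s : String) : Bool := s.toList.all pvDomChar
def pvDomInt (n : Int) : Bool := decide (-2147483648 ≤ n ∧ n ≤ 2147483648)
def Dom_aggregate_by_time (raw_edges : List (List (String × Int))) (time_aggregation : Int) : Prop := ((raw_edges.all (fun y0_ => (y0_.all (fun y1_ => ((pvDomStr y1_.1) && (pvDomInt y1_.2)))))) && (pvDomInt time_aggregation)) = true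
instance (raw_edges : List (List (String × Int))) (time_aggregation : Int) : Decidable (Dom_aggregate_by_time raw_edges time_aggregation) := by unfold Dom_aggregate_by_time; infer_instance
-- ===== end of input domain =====

-- B replaces A's times-list / min-offset / scatter-into-preallocated-buckets pipeline by a
-- direct per-time-step selection: each bucket is an order-preserving filter of raw_edges.

-- ===== PORT A =====
-- A: times = [int(re['time'] // ta) for re in raw_edges]; min/max; offset; preallocate; scatter.
-- `re['time']` is a first-match dict lookup; Pre_ guarantees the key exists, the list is
-- nonempty and ta ≠ 0, so the `.getD` defaults are never taken on admitted inputs.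
-- `seperated_edges[t]` is always in range there, so `.set`/`.getD` at `t.toNat` is exact.
def aggregate_by_time (raw_edges : List (List (String × Int))) (time_aggregation : Int) : List (List (List (String × Int))) :=
  let times := raw_edges.map (fun re => PySem.Int.floordiv (((PySem.Dict.mk re).get? "time").getD 0) time_aggregation)
  let min_time := (PySem.List.min? times (fun t => t)).getD 0
  let max_time := (PySem.List.max? times (fun t => t)).getD 0
  let times2 := times.map (fun t => t - min_time)
  let time_steps := max_time - min_time + 1
  let seperated_edges : List (List (List (String × Int))) := List.replicate time_steps.toNat []
  (List.zip times2 raw_edges).foldl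
    (fun s te => s.set te.1.toNat (s.getD te.1.toNat [] ++ [te.2])) seperated_edges

-- ===== PORT B =====
-- B: lo = min(bin(e)), hi = max(bin(e)); each bucket is the in-order selection
-- [e for e in raw_edges if bin(e) == t] for t in range(lo, hi+1).
def aggregate_by_time_alt (raw_edges : List (List (String × Int))) (time_aggregation : Int) : List (List (List (String × Int))) :=
  let bin := fun re => PySem.Int.floordiv (((PySem.Dict.mk re).get? "time").getD 0) time_aggregation
  let lo := (PySem.List.min? (raw_edges.map bin) (fun t => t)).getD 0
  let hi := (PySem.List.max? (raw_edges.map bin) (fun t => t)).getD 0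
  (PySem.List.pyRange lo (hi + 1)).map (fun t => raw_edges.filter (fun e => bin e == t))

-- ===== PRECONDITION & SPEC =====
-- Pre_ excludes exactly the inputs where the Python A raises: the empty edge list
-- (min([]) → ValueError), time_aggregation = 0 (ZeroDivisionError), and an edge
-- without a 'time' key (KeyError).
def Pre_aggregate_by_time (raw_edges : List (List (String × Int))) (time_aggregation : Int) : Prop :=
  raw_edges ≠ [] ∧ time_aggregation ≠ 0 ∧ ∀ re ∈ raw_edges, "time" ∈ re.map Prod.fst
instance (raw_edges : List (List (String × Int))) (time_aggregation : Int) : Decidable (Pre_aggregate_by_time raw_edges time_aggregation) := by unfold Pre_aggregate_by_time; infer_instance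
def pvWitness_aggregate_by_time : (List (List (String × Int))) × Int := ([[("time", 5)], [("time", 2)], [("time", 5)]], 2)

def Spec_aggregate_by_time (raw_edges : List (List (String × Int))) (time_aggregation : Int) (out : List (List (List (String × Int)))) : Prop := out = aggregate_by_time_alt raw_edges time_aggregation
instance (raw_edges : List (List (String × Int))) (time_aggregation : Int) (out : List (List (List (String × Int)))) : Decidable (Spec_aggregate_by_time raw_edges time_aggregation out) := by unfold Spec_aggregate_by_time; infer_instance

-- ===== CLAIM (what is proved, stated in full; the proofs are below) =====
def Claim_equal_aggregate_by_time : Prop := ∀ (raw_edges : List (List (String × Int))) (time_aggregation : Int), Dom_aggregate_by_time raw_edges time_aggregation → Pre_aggregate_by_time raw_edges time_aggregation → Spec_aggregate_by_time raw_edges time_aggregation (aggregate_by_time raw_edges time_aggregation)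

-- ===== LEMMAS AND PROOFS =====

-- A's scatter fold preserves the bucket-list length …
theorem pv_scatter_length (h : List (String × Int) → Nat) :
    ∀ (edges : List (List (String × Int))) (acc : List (List (List (String × Int)))),
      (edges.foldl (fun s e => s.set (h e) (s.getD (h e) [] ++ [e])) acc).length = acc.length := by
  intro edges
  induction edges with
  | nil => intro acc; rfl
  | cons e rest ih => intro acc; rw [List.foldl_cons, ih]; exact List.length_set ..

-- … and each bucket reads back as an in-order filter of the edges
theorem pv_scatter_getD (h : List (String × Int) → Nat) :
    ∀ (edges : List (List (String × Int))) (acc : List (List (List (String × Int))))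
      (_ : ∀ e ∈ edges, h e < acc.length) (j : Nat),
      (edges.foldl (fun s e => s.set (h e) (s.getD (h e) [] ++ [e])) acc).getD j []
        = acc.getD j [] ++ edges.filter (fun e => h e == j) := by
  intro edges
  induction edges with
  | nil => intro acc _ j; simp
  | cons e rest ih =>
    intro acc hall j
    simp only [List.foldl_cons, List.filter_cons]
    rw [ih _ (by intro x hx; simpa using hall x (List.mem_cons_of_mem _ hx))]
    by_cases hj : h e = j
    · subst hj
      have hlt : h e < acc.length := hall e (List.mem_cons_self ..)
      simp [List.getD, hlt]
    · have hb : (h e == j) = false := by simp [hj]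
      simp [List.getD, hj, hb]

-- pyRange with step 1 as a mapped List.range
theorem pv_pyRange_one (a b : Int) :
    PySem.List.pyRange a b = (List.range (b - a).toNat).map (fun k : Nat => a + (k : Int)) := by
  rw [PySem.List.pyRange]
  norm_num
  by_cases h : a < b
  · simp only [if_pos h]
  · simp only [if_neg h]
    have h0 : (b - a).toNat = 0 := by omega
    simp [h0]

-- ===== VERDICT (by name: the statement is the Claim_ definition above) =====
theorem aggregate_by_time_spec : Claim_equal_aggregate_by_time := by
  intro raw ta _ hpre
  obtain ⟨hne, -, -⟩ := hpre
  show aggregate_by_time raw ta = aggregate_by_time_alt raw ta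
  simp only [aggregate_by_time, aggregate_by_time_alt]
  set f : List (String × Int) → Int :=
    fun re => PySem.Int.floordiv (((PySem.Dict.mk re).get? "time").getD 0) ta with hfdef
  set ts : List Int := raw.map f with hts
  have htsne : ts ≠ [] := by simpa [hts] using hne
  obtain ⟨m, hm⟩ : ∃ m, PySem.List.min? ts (fun t => t) = some m := by
    cases h' : PySem.List.min? ts (fun t => t) with
    | none => exact absurd ((PySem.List.min?_eq_none_iff ts _).mp h') htsne
    | some m => exact ⟨m, rfl⟩
  obtain ⟨M, hM⟩ : ∃ M, PySem.List.max? ts (fun t => t) = some M := by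
    cases h' : PySem.List.max? ts (fun t => t) with
    | none => exact absurd ((PySem.List.max?_eq_none_iff ts _).mp h') htsne
    | some M => exact ⟨M, rfl⟩
  have hmle : ∀ e ∈ raw, m ≤ f e := fun e he =>
    PySem.List.min?_isMin hm (f e) (hts ▸ List.mem_map_of_mem he)
  have hMge : ∀ e ∈ raw, f e ≤ M := fun e he =>
    PySem.List.max?_isMax hM (f e) (hts ▸ List.mem_map_of_mem he)
  rw [hm, hM]
  simp only [Option.getD_some]
  have hzip : List.zip (ts.map (fun t => t - m)) raw = raw.map (fun e => (f e - m, e)) := by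
    calc List.zip ((raw.map f).map (fun t => t - m)) raw
        = List.zip (raw.map (fun e => f e - m)) (raw.map id) := by
          rw [List.map_map, List.map_id]
          rfl
      _ = raw.map (fun e => (f e - m, id e)) := List.zip_map'
  rw [hzip, List.foldl_map, pv_pyRange_one m (M + 1), List.map_map]
  have hbound : ∀ e ∈ raw,
      (f e - m).toNat < (List.replicate (M - m + 1).toNat ([] : List (List (String × Int)))).length := by
    intro e he
    have h1 := hmle e he
    have h2 := hMge e he
    simp only [List.length_replicate]
    omega
  apply List.ext_getElem
  · rw [pv_scatter_length (fun e => (f e - m).toNat) raw]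
    simp only [List.length_replicate, List.length_map, List.length_range]
    omega
  · intro j hj1 hj2
    rw [← List.getD_eq_getElem _ [] hj1,
      pv_scatter_getD (fun e => (f e - m).toNat) raw _ hbound j]
    have hjlt : j < (M - m + 1).toNat := by
      have := hj1
      rw [pv_scatter_length (fun e => (f e - m).toNat) raw] at this
      simpa using this
    have hrep : (List.replicate (M - m + 1).toNat ([] : List (List (String × Int)))).getD j []
        = ([] : List (List (String × Int))) := List.getD_replicate _ hjlt
    simp only [List.getElem_map, List.getElem_range, Function.comp, hrep, List.nil_append]
    refine List.filter_congr ?_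
    intro e he
    have h1 := hmle e he
    have h2 := hMge e he
    by_cases hh : f e = m + (j : Int)
    · have ht : (f e - m).toNat = j := by omega
      simp only [ht, beq_self_eq_true]
      exact (beq_iff_eq.mpr hh).symm
    · have ht : (f e - m).toNat ≠ j := by omega
      simp only [beq_eq_false_iff_ne.mpr ht]
      symm
      simp only [beq_eq_false_iff_ne, ne_eq]
      exact hh
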